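-- pv_equiv track=rewrite | github.com/ulleea/ulleea | some_tasks/knapsack.py | summs
-- ===== SOURCE A (Python) =====
-- def summs(c,a,w,n):
--     sum=0
--     sumv=0
--     num=int(n/4)
--     for i in range(n-1,-1,-1):
--         # sum+=a[i][0]
--         sumv+=a[i][1]
--         # c[i][0]=sum
--         c[i]=sumv
--     sum=0
--     max=0
--     for i in range(n-1,-1,-1):
--         if max+a[i][0]<=w:
--             sum+=a[i][1]
--             max+=a[i][0]
--     total_max=sum
--     for _ in range(num):
--         sum=0
--         max=0
--         for i in range(_):
--             if max + a[i][0] <= w: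
--                 sum += a[i][1]
--                 max += a[i][0]
--         for j in range(n-1,_,-1):
--             if max + a[j][0] <= w:
--                 sum += a[j][1]
--                 max += a[j][0]
--         if sum > total_max:
--             total_max = sum
--     return c,total_max
-- ===== SOURCE B (Python) =====
-- # Alternative decomposition: build the ascending-greedy prefix-state table once,
-- # so each candidate split only runs the descending suffix pass.
-- # NOTE: like A, this mutates the list `c` in place (c[:m] = ...).
-- def summs(c, a, w, n):
--     m = n if n > 0 else 0
--
--     # suffix sums of item values, written into c in place
--     suf = []
--     run = 0
--     for p in reversed(a[:m]):
--         run += p[1]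
--         suf.append(run)
--     suf.reverse()
--     c[:m] = suf
--
--     def step(state, item):
--         s, mx = state
--         if mx + item[0] <= w:
--             return (s + item[1], mx + item[0])
--         return state
--
--     # full descending greedy
--     st = (0, 0)
--     for item in reversed(a[:m]):
--         st = step(st, item)
--     total_max = st[0]
--
--     num = m // 4
--
--     # prefix greedy states: pre[k] = greedy state after items 0..k-1 ascending
--     pre = [(0, 0)]
--     for item in a[:max(num - 1, 0)]:
--         pre.append(step(pre[-1], item))
--
--     for k in range(num):
--         st = pre[k]
--         for j in range(m - 1, k, -1):
--             st = step(st, a[j])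
--         if st[0] > total_max:
--             total_max = st[0]
--
--     return c, total_max
-- ===== Notes on version B (the rewrite author's own statement) =====
-- stated objective: alternative
-- what changed: B precomputes a table of ascending-greedy prefix states once and starts each candidate pass from its table entry, so the per-candidate inner ascending loop disappears and only the descending suffix pass runs; the suffix sums are built back-to-front in a new list and slice-assigned into c instead of index-by-index descending writes.
import Mathlib
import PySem

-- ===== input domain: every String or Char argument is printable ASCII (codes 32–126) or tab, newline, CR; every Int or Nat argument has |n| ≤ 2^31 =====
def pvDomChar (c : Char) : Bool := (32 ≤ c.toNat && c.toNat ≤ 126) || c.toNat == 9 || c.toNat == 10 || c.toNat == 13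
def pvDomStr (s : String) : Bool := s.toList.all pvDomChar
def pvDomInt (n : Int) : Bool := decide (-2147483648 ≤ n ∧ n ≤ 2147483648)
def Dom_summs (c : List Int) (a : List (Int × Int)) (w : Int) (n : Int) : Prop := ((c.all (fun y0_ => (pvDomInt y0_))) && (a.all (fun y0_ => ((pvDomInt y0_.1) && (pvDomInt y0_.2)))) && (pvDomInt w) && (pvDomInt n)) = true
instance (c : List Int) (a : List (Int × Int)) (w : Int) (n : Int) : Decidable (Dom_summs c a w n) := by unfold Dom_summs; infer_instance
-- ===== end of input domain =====

-- B replaces the per-candidate inner ascending greedy loop by a precomputed prefix-state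
-- table (objective: alternative decomposition, same asymptotic cost).  Python A mutates the
-- list `c` in place; equivalence here is about the returned value (B performs the same mutation).

-- ===== PORT A =====
-- int(n/4): float division by 4 is exact for |n| ≤ 2^31, int() truncates toward zero;
-- ported exactly as truncated division.
def summs (c : List Int) (a : List (Int × Int)) (w : Int) (n : Int) : List Int × Int :=
  let num : Int := if 0 ≤ n then n / 4 else -((-n) / 4)
  -- for i in range(n-1,-1,-1): sumv += a[i][1]; c[i] = sumv
  -- (loop indices are 0..n-1, in range under Pre_; List.set stands in for c[i] = v)
  let st1 := (PySem.List.pyRange (n - 1) (-1) (-1)).foldl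
      (fun (st : List Int × Int) i =>
        let sumv := st.2 + (PySem.List.pyGetD a i (0, 0)).2
        (st.1.set i.toNat sumv, sumv)) (c, 0)
  -- for i in range(n-1,-1,-1): greedy over all items descending
  let s1 := (PySem.List.pyRange (n - 1) (-1) (-1)).foldl
      (fun (st : Int × Int) i =>
        if st.2 + (PySem.List.pyGetD a i (0, 0)).1 ≤ w then
          (st.1 + (PySem.List.pyGetD a i (0, 0)).2, st.2 + (PySem.List.pyGetD a i (0, 0)).1)
        else st) (0, 0)
  -- for _ in range(num): ascending prefix greedy, then descending suffix greedy
  let totalMax := (PySem.List.pyRange 0 num 1).foldl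
      (fun tm k =>
        let s2 := (PySem.List.pyRange 0 k 1).foldl
            (fun (st : Int × Int) i =>
              if st.2 + (PySem.List.pyGetD a i (0, 0)).1 ≤ w then
                (st.1 + (PySem.List.pyGetD a i (0, 0)).2, st.2 + (PySem.List.pyGetD a i (0, 0)).1)
              else st) (0, 0)
        let s3 := (PySem.List.pyRange (n - 1) k (-1)).foldl
            (fun (st : Int × Int) j =>
              if st.2 + (PySem.List.pyGetD a j (0, 0)).1 ≤ w then
                (st.1 + (PySem.List.pyGetD a j (0, 0)).2, st.2 + (PySem.List.pyGetD a j (0, 0)).1)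
              else st) s2
        if s3.1 > tm then s3.1 else tm) s1.1
  (st1.1, totalMax)

-- ===== PORT B =====
def bstep (w : Int) (st : Int × Int) (p : Int × Int) : Int × Int :=
  if st.2 + p.1 ≤ w then (st.1 + p.2, st.2 + p.1) else st

def summs_alt (c : List Int) (a : List (Int × Int)) (w : Int) (n : Int) : List Int × Int :=
  let m : Int := if n > 0 then n else 0
  let am := a.take m.toNat                  -- a[:m]
  -- suffix sums built back-to-front, then reversed
  let acc := am.reverse.foldl
      (fun (st : Int × List Int) p => (st.1 + p.2, st.2 ++ [st.1 + p.2])) (0, [])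
  let suf := acc.2.reverse
  let c2 := suf ++ c.drop m.toNat           -- c[:m] = suf  (slice assignment)
  -- full descending greedy
  let totalMax0 := (am.reverse.foldl (bstep w) (0, 0)).1
  let num := m / 4                          -- m // 4, m ≥ 0
  -- prefix table: pre[k] = greedy state after items 0..k-1 ascending
  let pre := (a.take (num - 1).toNat).foldl -- a[:max(num-1, 0)]
      (fun (l : List (Int × Int)) item => l ++ [bstep w (PySem.List.pyGetD l (-1) (0, 0)) item])
      [(0, 0)]
  let totalMax := (PySem.List.pyRange 0 num 1).foldl
      (fun tm k =>
        let st0 := PySem.List.pyGetD pre k (0, 0)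
        let st := (PySem.List.pyRange (m - 1) k (-1)).foldl
            (fun st j => bstep w st (PySem.List.pyGetD a j (0, 0))) st0
        if st.1 > tm then st.1 else tm) totalMax0
  (c2, totalMax)

-- ===== PRECONDITION & SPEC =====
-- Python A raises IndexError iff n exceeds the length of c or of a; Pre_ is exactly the returning inputs.
def Pre_summs (c : List Int) (a : List (Int × Int)) (w : Int) (n : Int) : Prop :=
  n ≤ (c.length : Int) ∧ n ≤ (a.length : Int)
instance (c : List Int) (a : List (Int × Int)) (w : Int) (n : Int) : Decidable (Pre_summs c a w n) := by unfold Pre_summs; infer_instance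

def pvWitness_summs : List Int × (List (Int × Int)) × Int × Int :=
  ([5, 5, 5], [(1, 2), (3, 4), (2, 1)], 4, 3)

def Spec_summs (c : List Int) (a : List (Int × Int)) (w : Int) (n : Int) (out : List Int × Int) : Prop := out = summs_alt c a w n
instance (c : List Int) (a : List (Int × Int)) (w : Int) (n : Int) (out : List Int × Int) : Decidable (Spec_summs c a w n out) := by unfold Spec_summs; infer_instance

-- ===== CLAIM (what is proved, stated in full; the proofs are below) =====
def Claim_equal_summs : Prop := ∀ (c : List Int) (a : List (Int × Int)) (w : Int) (n : Int), Dom_summs c a w n → Pre_summs c a w n → Spec_summs c a w n (summs c a w n)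

-- ===== LEMMAS AND PROOFS =====

-- running suffix sums of the .2-components of a reversed item list, plus their total
def sufAux : List (Int × Int) → Int → Int × List Int
  | [], s => (s, [])
  | p :: r, s => let q := sufAux r (s + p.2); (q.1, q.2 ++ [s + p.2])

-- successive greedy states
def states (w : Int) : List (Int × Int) → (Int × Int) → List (Int × Int)
  | [], _ => []
  | x :: t, s => bstep w s x :: states w t (bstep w s x)

theorem pv_drop_set {α : Type} (l : List α) (i : ℕ) (x : α) (h : i < l.length) :
    (l.set i x).drop i = x :: l.drop (i + 1) := by
  induction l generalizing i with
  | nil => simp at h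
  | cons y t ih =>
    cases i with
    | zero => simp
    | succ j => simpa using ih j (by simpa using h)

-- A's first loop (suffix sums written into c) in closed form
theorem pv_LemA_c (a : List (Int × Int)) (k : ℕ) (c0 : List Int) (s : Int)
    (ha : k ≤ a.length) (hc : k ≤ c0.length) :
    (PySem.List.pyRange ((k : Int) - 1) (-1) (-1)).foldl
      (fun (st : List Int × Int) i =>
        let sumv := st.2 + (PySem.List.pyGetD a i (0, 0)).2
        (st.1.set i.toNat sumv, sumv)) (c0, s)
    = ((sufAux ((a.take k).reverse) s).2 ++ c0.drop k, (sufAux ((a.take k).reverse) s).1) := by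
  induction k generalizing c0 s with
  | zero => simp [sufAux]
  | succ k ih =>
    have hk : k < a.length := by omega
    have hcast : ((k + 1 : ℕ) : Int) - 1 = (k : Int) := by push_cast; ring
    rw [hcast, PySem.List.pyRange_neg_one_cons (by omega : (-1 : Int) < (k : Int)), List.foldl_cons]
    have hget : PySem.List.pyGetD a ((k : ℕ) : Int) (0, 0) = a[k] := by
      rw [PySem.List.pyGetD_eq_getElem a _ (by omega) (by exact_mod_cast hk)]; simp
    simp only [hget, Int.toNat_natCast]
    rw [ih (c0.set k (s + a[k].2)) (s + a[k].2) (by omega) (by simp; omega)]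
    have htake : (a.take (k + 1)).reverse = a[k] :: (a.take k).reverse := by
      rw [List.take_add_one]
      simp [hk]
    rw [htake]
    simp only [sufAux]
    rw [pv_drop_set c0 k (s + a[k].2) (by omega)]
    simp

-- B's suffix-sum accumulator in the same closed form
theorem pv_LemB_suf (r : List (Int × Int)) (s : Int) (acc : List Int) :
    r.foldl (fun (st : Int × List Int) p => (st.1 + p.2, st.2 ++ [st.1 + p.2])) (s, acc)
    = ((sufAux r s).1, acc ++ (sufAux r s).2.reverse) := by
  induction r generalizing s acc with
  | nil => simp [sufAux]
  | cons p t ih => simp [sufAux, ih (s + p.2) (acc ++ [s + p.2])]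

-- [a[j] for j in range(s, t)] as drop/take (indices in range, so the default never fires)
theorem pv_LemMap (a : List (Int × Int)) (d : Int × Int) (s t : Int)
    (hs : 0 ≤ s) (ht : t ≤ (a.length : Int)) :
    (PySem.List.pyRange s t 1).map (fun j => PySem.List.pyGetD a j d)
    = (a.take t.toNat).drop s.toNat := by
  by_cases h : t ≤ 0
  · rw [PySem.List.pyRange_one_eq_nil (by omega)]
    have : t.toNat = 0 := by omega
    simp [this]
  · have hlen : (a.take t.toNat).length = t.toNat := by simp; omega
    have hcong : (PySem.List.pyRange s t 1).map (fun j => PySem.List.pyGetD a j d)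
        = (PySem.List.pyRange s t 1).map (fun j => PySem.List.pyGetD (a.take t.toNat) j d) := by
      apply List.map_congr_left
      intro j hj
      rw [PySem.List.mem_pyRange_one] at hj
      rw [PySem.List.pyGetD_eq_getElem a d (by omega) (by omega),
          PySem.List.pyGetD_eq_getElem (a.take t.toNat) d (by omega) (by rw [hlen]; omega)]
      rw [List.getElem_take]
    rw [hcong]
    have h2 := PySem.List.map_pyGetD_pyRange (a.take t.toNat) d (a := s) hs
    simp only [PySem.List.len, hlen] at h2
    rw [show t = ((t.toNat : ℕ) : Int) by omega]
    exact h2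

-- ascending index loop over a[0:k] as a fold over the prefix
theorem pv_LemAsc (a : List (Int × Int)) (d : Int × Int)
    (f : (Int × Int) → (Int × Int) → Int × Int) (init : Int × Int)
    (k : Int) (_hk : 0 ≤ k) (ha : k ≤ (a.length : Int)) :
    (PySem.List.pyRange 0 k 1).foldl (fun st i => f st (PySem.List.pyGetD a i d)) init
    = (a.take k.toNat).foldl f init := by
  rw [← List.foldl_map, pv_LemMap a d 0 k le_rfl ha]
  simp

-- descending index loop over a[k+1:nN] as a fold over the reversed slice
theorem pv_LemDesc (a : List (Int × Int)) (d : Int × Int)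
    (f : (Int × Int) → (Int × Int) → Int × Int) (init : Int × Int)
    (nN : ℕ) (k : Int) (ha : nN ≤ a.length) (hk : -1 ≤ k) :
    (PySem.List.pyRange ((nN : Int) - 1) k (-1)).foldl
        (fun st j => f st (PySem.List.pyGetD a j d)) init
    = (((a.take nN).drop (k + 1).toNat).reverse).foldl f init := by
  rw [PySem.List.pyRange_neg_one_eq_reverse, show (nN : Int) - 1 + 1 = (nN : Int) by ring,
      ← List.foldl_map, List.map_reverse,
      pv_LemMap a d (k + 1) (nN : Int) (by omega) (by exact_mod_cast Nat.cast_le.mpr ha)]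
  simp

-- B's table builder appends successive greedy states
theorem pv_LemBuild (w : Int) (xs : List (Int × Int)) : ∀ (l0 : List (Int × Int)) (h : l0 ≠ []),
    xs.foldl (fun l item => l ++ [bstep w (PySem.List.pyGetD l (-1) (0, 0)) item]) l0
    = l0 ++ states w xs (l0.getLast h) := by
  induction xs with
  | nil => intro l0 h; simp [states]
  | cons x t ih =>
    intro l0 h
    have hlast : PySem.List.pyGetD l0 (-1) (0, 0) = l0.getLast h :=
      PySem.List.pyGetD_neg_one l0 (0, 0) h
    simp only [List.foldl_cons, hlast]
    rw [ih (l0 ++ [bstep w (l0.getLast h) x]) (by simp)]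
    rw [List.getLast_append_of_ne_nil (by simp)]
    simp [states]
    simp

theorem pv_states_length (w : Int) (xs : List (Int × Int)) : ∀ s, (states w xs s).length = xs.length := by
  induction xs with
  | nil => intro s; simp [states]
  | cons x t ih => intro s; simp [states, ih]

-- entry k of the state table is the greedy fold over the first k items
theorem pv_LemQ (w : Int) (xs : List (Int × Int)) (s : Int × Int) (k : ℕ)
    (hk : k ≤ xs.length) :
    (s :: states w xs s).getD k (0, 0) = (xs.take k).foldl (bstep w) s := by
  induction xs generalizing s k with
  | nil =>
    have : k = 0 := by simpa using hk
    subst this; simp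
  | cons x t ih =>
    cases k with
    | zero => simp
    | succ j =>
      have := ih (bstep w s x) j (by simpa using hk)
      simpa [states] using this

-- ===== VERDICT (by name: the statement is the Claim_ definition above) =====
theorem summs_spec : Claim_equal_summs := by
  intro c a w n _hdom hpre
  obtain ⟨hc, ha⟩ := hpre
  unfold Spec_summs
  by_cases hn : n ≤ 0
  · -- both programs do nothing: every loop range is empty
    have hnum : (if 0 ≤ n then n / 4 else -((-n) / 4)) ≤ 0 := by split_ifs <;> omega
    have hm : (if n > 0 then n else (0 : Int)) = 0 := by split_ifs <;> omega
    simp [summs, summs_alt, hm,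
      PySem.List.pyRange_neg_one_eq_nil (by omega : n - 1 ≤ -1),
      PySem.List.pyRange_one_eq_nil (le_trans hnum (le_refl _)),
      PySem.List.pyRange_one_eq_nil (by norm_num : (0 : Int) ≤ 0)]
  · -- main case: 0 < n
    have hn0 : 0 < n := by omega
    have hm : (if n > 0 then n else (0 : Int)) = n := by split_ifs <;> omega
    have hnum0 : (if 0 ≤ n then n / 4 else -((-n) / 4)) = n / 4 := by split_ifs <;> omega
    have hn' : n = ((n.toNat : ℕ) : Int) := by omega
    have haN : n.toNat ≤ a.length := by omega
    have hcN : n.toNat ≤ c.length := by omega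
    have hb : (fun (st : Int × Int) (i : Int) =>
        if st.2 + (PySem.List.pyGetD a i (0, 0)).1 ≤ w then
          (st.1 + (PySem.List.pyGetD a i (0, 0)).2, st.2 + (PySem.List.pyGetD a i (0, 0)).1)
        else st) = fun st i => bstep w st (PySem.List.pyGetD a i (0, 0)) := rfl
    simp only [summs, summs_alt, hm, hnum0, hb]
    rw [hn']
    rw [pv_LemA_c a n.toNat c 0 haN hcN]
    rw [pv_LemDesc a (0, 0) (bstep w) (0, 0) n.toNat (-1) haN (by norm_num)]
    rw [pv_LemB_suf]
    rw [pv_LemBuild w (a.take (((n.toNat : ℕ) : Int) / 4 - 1).toNat) [(0, 0)] (by simp)]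
    simp only [Int.toNat_natCast, List.reverse_reverse, List.nil_append, List.cons_append,
      List.getLast_singleton, show ((-1 : Int) + 1).toNat = 0 by norm_num, List.drop_zero]
    refine congrArg (Prod.mk _) ?_
    apply PySem.List.foldl_congr_mem
    intro tm k hk
    rw [PySem.List.mem_pyRange_one] at hk
    have hnum_le : ((n.toNat : ℕ) : Int) / 4 ≤ ((n.toNat : ℕ) : Int) := by omega
    rw [pv_LemAsc a (0, 0) (bstep w) (0, 0) k hk.1 (by omega)]
    have hxlen : (a.take (((n.toNat : ℕ) : Int) / 4 - 1).toNat).length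
        = (((n.toNat : ℕ) : Int) / 4 - 1).toNat := by simp; omega
    rw [PySem.List.pyGetD_eq_getElem _ _ hk.1 (by simp [pv_states_length]; omega)]
    rw [← List.getD_eq_getElem]
    rw [pv_LemQ w _ (0, 0) k.toNat (by rw [hxlen]; omega)]
    rw [List.take_take, Nat.min_eq_left (by omega)]
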